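-- pv_equiv track=rewrite | github.com/Yaasai/ia-ep2 | regra.py | esta_satisfeita
-- ===== SOURCE A (Python) =====
-- def esta_satisfeita(atribuicao):
--   rodada = list(atribuicao.keys())[-1]
--   rodada = rodada[0:2]
--   jogos_rodada = [x for x in list(atribuicao.keys()) if x.__contains__(rodada)]
--   rodadas = []
--
--   for possibilidade in jogos_rodada:
--     times = atribuicao[possibilidade]
--     if times is not None:
--       time1 = times[0]
--       time2 = times[1]
--       if (time1 in rodadas or time2 in rodadas):
--         return False
--       else:
--         rodadas.append(time1)
--         rodadas.append(time2)
--   return True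
-- ===== SOURCE B (Python) =====
-- def esta_satisfeita(atribuicao):
--     chaves = list(atribuicao.keys())
--     rodada = chaves[-1][0:2]
--     jogos = [atribuicao[c] for c in chaves if rodada in c]
--     pares = [(t[0], t[1]) for t in jogos if t is not None]
--     for i in range(len(pares)):
--         a1, a2 = pares[i]
--         for j in range(i + 1, len(pares)):
--             b1, b2 = pares[j]
--             if b1 == a1 or b1 == a2 or b2 == a1 or b2 == a2:
--                 return False
--     return True
-- ===== Notes on version B (the rewrite author's own statement) =====
-- stated objective: alternative
-- what changed: B reads the condition as 'no two games of the last round share a team': it builds the list of (team1, team2) pairs of the selected games and checks pairwise disjointness with two nested index loops, instead of A's single pass with an early-exit membership test against a growing accumulator; Pre_ excludes the empty dict and inputs where a selected game's team list is shorter than 2 (A raises IndexError there, or returns False only because a duplicate happens to come first while B, which collects all pairs before comparing, raises).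
-- outside the precondition, e.g. on esta_satisfeita({'r1 a': [1, 2], 'r1 b': [1, 3], 'r1 c': []}): A returns False, B raises IndexError
import Mathlib
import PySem

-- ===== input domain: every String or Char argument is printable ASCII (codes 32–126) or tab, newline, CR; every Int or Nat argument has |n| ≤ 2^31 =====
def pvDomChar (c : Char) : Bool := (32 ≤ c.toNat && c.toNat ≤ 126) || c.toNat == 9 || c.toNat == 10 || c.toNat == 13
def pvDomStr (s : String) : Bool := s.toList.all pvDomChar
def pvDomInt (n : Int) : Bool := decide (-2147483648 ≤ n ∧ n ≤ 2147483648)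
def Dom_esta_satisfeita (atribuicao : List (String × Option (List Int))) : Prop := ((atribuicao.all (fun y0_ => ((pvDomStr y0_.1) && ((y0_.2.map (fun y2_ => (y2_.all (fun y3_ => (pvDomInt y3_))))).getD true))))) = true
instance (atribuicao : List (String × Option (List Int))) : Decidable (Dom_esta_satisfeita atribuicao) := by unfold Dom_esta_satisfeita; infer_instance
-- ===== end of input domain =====

-- B reads the condition as "no two games of the last round share a team": it collects the
-- selected games' (team1, team2) pairs and checks pairwise disjointness, instead of A's
-- single early-exit scan against a growing accumulator.

-- ===== PORT A =====
-- the for-loop of A: early return False on the first repeated team, else accumulate both teams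
def estaLoopA (d : PySem.Dict String (Option (List Int))) :
    List String → List Int → Bool
  | [], _ => true
  | possibilidade :: rest, rodadas =>
    match PySem.Dict.get? d possibilidade with
    | none => false        -- KeyError: unreachable, the key comes from d.keys
    | some none => estaLoopA d rest rodadas
    | some (some times) =>
      match PySem.List.pyGet? times 0, PySem.List.pyGet? times 1 with
      | some time1, some time2 =>
        if time1 ∈ rodadas ∨ time2 ∈ rodadas then false
        else estaLoopA d rest (rodadas ++ [time1] ++ [time2])
      | _, _ => false       -- IndexError (times shorter than 2): excluded by Pre_

def esta_satisfeita (atribuicao : List (String × Option (List Int))) : Bool :=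
  let d := PySem.Dict.ofList atribuicao
  match PySem.List.pyGet? (PySem.Dict.keys d) (-1) with
  | none => false           -- IndexError on empty dict: excluded by Pre_
  | some rodadaKey =>
    let rodada := PySem.Str.slice rodadaKey (some 0) (some 2)
    let jogos_rodada := (PySem.Dict.keys d).filter (fun x => PySem.Str.isIn rodada x)
    estaLoopA d jogos_rodada []

-- ===== PORT B =====
-- [atribuicao[c] for c in chaves if rodada in c]
def jogosB (d : PySem.Dict String (Option (List Int))) (rodada : String) :
    List String → Option (List (Option (List Int)))
  | [] => some []
  | c :: rest =>
    if PySem.Str.isIn rodada c then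
      match PySem.Dict.get? d c with
      | none => none        -- KeyError: unreachable, the key comes from d.keys
      | some t => (jogosB d rodada rest).map (fun ts => t :: ts)
    else jogosB d rodada rest

-- [(t[0], t[1]) for t in jogos if t is not None]; none = IndexError, excluded by Pre_
def paresB : List (Option (List Int)) → Option (List (Int × Int))
  | [] => some []
  | none :: rest => paresB rest
  | some t :: rest =>
    match PySem.List.pyGet? t 0, PySem.List.pyGet? t 1 with
    | some a, some b => (paresB rest).map (fun ps => (a, b) :: ps)
    | _, _ => none

-- the nested index loops: pares[i] against every pares[j], j > i
def pairB : List (Int × Int) → Bool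
  | [] => true
  | p :: rest =>
    if rest.any (fun q => q.1 == p.1 || q.1 == p.2 || q.2 == p.1 || q.2 == p.2) then false
    else pairB rest

def esta_satisfeita_alt (atribuicao : List (String × Option (List Int))) : Bool :=
  let d := PySem.Dict.ofList atribuicao
  let chaves := PySem.Dict.keys d
  match PySem.List.pyGet? chaves (-1) with
  | none => false           -- IndexError on empty dict: excluded by Pre_
  | some ultima =>
    let rodada := PySem.Str.slice ultima (some 0) (some 2)
    match jogosB d rodada chaves with
    | none => false
    | some jogos =>
      match paresB jogos with
      | none => false       -- IndexError: excluded by Pre_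
      | some pares => pairB pares

-- ===== PRECONDITION & SPEC =====
-- Pre_ excludes the empty dict (A raises IndexError on keys[-1]) and inputs where some game of
-- the last round has a team list shorter than 2 (A raises IndexError when it reaches it; on a few
-- such inputs A still returns False, having met a duplicate first, while B raises — see cites).
def Pre_esta_satisfeita (atribuicao : List (String × Option (List Int))) : Prop :=
  atribuicao ≠ [] ∧
  ∀ p ∈ (PySem.Dict.ofList atribuicao).items,
    PySem.Str.isIn
        (PySem.Str.slice (((PySem.Dict.ofList atribuicao).keys.getLast?).getD "") (some 0) (some 2))
        p.1 = true →
      2 ≤ (p.2.map List.length).getD 2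

instance (atribuicao : List (String × Option (List Int))) : Decidable (Pre_esta_satisfeita atribuicao) := by
  unfold Pre_esta_satisfeita; infer_instance

def pvWitness_esta_satisfeita : (List (String × Option (List Int))) :=
  [("r1 j1", some [1, 2]), ("r1 j2", none), ("r1 j3", some [3, 4])]

def Spec_esta_satisfeita (atribuicao : List (String × Option (List Int))) (out : Bool) : Prop := out = esta_satisfeita_alt atribuicao
instance (atribuicao : List (String × Option (List Int))) (out : Bool) : Decidable (Spec_esta_satisfeita atribuicao out) := by unfold Spec_esta_satisfeita; infer_instance

-- ===== CLAIM (what is proved, stated in full; the proofs are below) =====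
def Claim_equal_esta_satisfeita : Prop := ∀ (atribuicao : List (String × Option (List Int))), Dom_esta_satisfeita atribuicao → Pre_esta_satisfeita atribuicao → Spec_esta_satisfeita atribuicao (esta_satisfeita atribuicao)

-- ===== LEMMAS AND PROOFS =====

-- A's scan restated over the already-collected pair list
def scanP : List Int → List (Int × Int) → Bool
  | _, [] => true
  | rod, (a, b) :: rest =>
    if a ∈ rod ∨ b ∈ rod then false else scanP (rod ++ [a] ++ [b]) rest

-- pushing a pair onto the accumulator splits the "touches" test
lemma allShift (a b : Int) (qs : List (Int × Int)) (rod : List Int) :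
    qs.all (fun p => !(decide (p.1 ∈ rod ++ [a] ++ [b]) || decide (p.2 ∈ rod ++ [a] ++ [b])))
      = (qs.all (fun p => !(decide (p.1 ∈ rod) || decide (p.2 ∈ rod)))
         && !qs.any (fun q => q.1 == a || q.1 == b || q.2 == a || q.2 == b)) := by
  induction qs with
  | nil => simp
  | cons q qs ih =>
    simp only [List.all_cons, List.any_cons, ih]
    have h1 : (!(decide (q.1 ∈ rod ++ [a] ++ [b]) || decide (q.2 ∈ rod ++ [a] ++ [b])))
        = ((!(decide (q.1 ∈ rod) || decide (q.2 ∈ rod)))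
           && !(q.1 == a || q.1 == b || q.2 == a || q.2 == b)) := by
      simp only [List.mem_append, List.mem_singleton]
      by_cases hq1 : q.1 ∈ rod <;> by_cases hq2 : q.2 ∈ rod <;>
        by_cases e1 : q.1 = a <;> by_cases e2 : q.1 = b <;>
        by_cases e3 : q.2 = a <;> by_cases e4 : q.2 = b <;>
        simp [hq1, hq2, e1, e2, e3, e4]
    rw [h1]
    cases hx : (!(decide (q.1 ∈ rod) || decide (q.2 ∈ rod))) <;>
      cases hy : (q.1 == a || q.1 == b || q.2 == a || q.2 == b) <;>
      cases hz : qs.all (fun p => !(decide (p.1 ∈ rod) || decide (p.2 ∈ rod))) <;>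
      cases hw : qs.any (fun q => q.1 == a || q.1 == b || q.2 == a || q.2 == b) <;>
      simp

-- the early-exit scan factors: "no pair touches rod" and "the pairs are pairwise disjoint"
lemma scanP_eq (ps : List (Int × Int)) : ∀ rod : List Int,
    scanP rod ps
      = (ps.all (fun p => !(decide (p.1 ∈ rod) || decide (p.2 ∈ rod))) && pairB ps) := by
  induction ps with
  | nil => intro rod; simp [scanP, pairB]
  | cons p rest ih =>
    intro rod
    obtain ⟨a, b⟩ := p
    by_cases h : a ∈ rod ∨ b ∈ rod
    · simp [scanP, h]
      tauto
    · push Not at h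
      rw [scanP, if_neg (by tauto), ih]
      simp only [List.all_cons, pairB, allShift]
      simp only [h.1, h.2]
      cases hc : rest.any (fun q => q.1 == a || q.1 == b || q.2 == a || q.2 == b) <;>
        simp [Bool.and_comm]

-- under well-formedness: A's interleaved loop over the filtered keys equals
-- "collect the pairs, then scan them"
lemma loop_eq (d : PySem.Dict String (Option (List Int))) (rodada : String) :
    ∀ (js : List String) (rodadas : List Int),
      (∀ j ∈ js, d.get? j ≠ none) →
      (∀ j ∈ js, PySem.Str.isIn rodada j = true →
        ∀ l, d.get? j = some (some l) → 2 ≤ l.length) →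
      ∃ ts ps, jogosB d rodada js = some ts ∧ paresB ts = some ps ∧
        estaLoopA d (js.filter (fun x => PySem.Str.isIn rodada x)) rodadas = scanP rodadas ps := by
  intro js
  induction js with
  | nil =>
    intro rodadas _ _
    exact ⟨[], [], rfl, rfl, rfl⟩
  | cons j rest ih =>
    intro rodadas hsome hwf
    have hsome' : ∀ a ∈ rest, d.get? a ≠ none := fun a ha => hsome a (List.mem_cons_of_mem j ha)
    have hwf' : ∀ a ∈ rest, PySem.Str.isIn rodada a = true →
        ∀ l, d.get? a = some (some l) → 2 ≤ l.length :=
      fun a ha => hwf a (List.mem_cons_of_mem j ha)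
    have hjmem : j ∈ j :: rest := List.mem_cons_self
    by_cases hj : PySem.Str.isIn rodada j = true
    · rw [List.filter_cons_of_pos hj]
      cases hg : PySem.Dict.get? d j with
      | none => exact absurd hg (hsome j hjmem)
      | some v =>
        cases v with
        | none =>
          obtain ⟨ts, ps, h1, h2, h3⟩ := ih rodadas hsome' hwf'
          refine ⟨none :: ts, ps, ?_, by simp [paresB, h2], by simpa [estaLoopA, hg] using h3⟩
          simp only [jogosB]
          rw [if_pos hj, hg, h1]
          rfl
        | some l =>
          have hl : 2 ≤ l.length := hwf j hjmem hj l hg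
          have h0 : PySem.List.pyGet? l 0 = some l[0] :=
            PySem.List.pyGet?_ofNat l 0 (by omega)
          have h1 : PySem.List.pyGet? l 1 = some l[1] :=
            PySem.List.pyGet?_ofNat l 1 (by omega)
          by_cases hdup : l[0] ∈ rodadas ∨ l[1] ∈ rodadas
          · obtain ⟨ts, ps, ha, hb, _⟩ := ih (rodadas ++ [l[0]] ++ [l[1]]) hsome' hwf'
            refine ⟨some l :: ts, (l[0], l[1]) :: ps, ?_,
              by simp [paresB, h0, h1, hb], ?_⟩
            · simp only [jogosB]
              rw [if_pos hj, hg, ha]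
              rfl
            · simp [estaLoopA, hg, h0, h1, hdup, scanP]
          · obtain ⟨ts, ps, ha, hb, hc⟩ := ih (rodadas ++ [l[0]] ++ [l[1]]) hsome' hwf'
            refine ⟨some l :: ts, (l[0], l[1]) :: ps, ?_,
              by simp [paresB, h0, h1, hb], ?_⟩
            · simp only [jogosB]
              rw [if_pos hj, hg, ha]
              rfl
            · rw [estaLoopA, hg]
              simp only [h0, h1]
              rw [if_neg hdup, hc, scanP, if_neg hdup]
    · rw [List.filter_cons_of_neg (by simpa using hj)]
      obtain ⟨ts, ps, h1, h2, h3⟩ := ih rodadas hsome' hwf'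
      refine ⟨ts, ps, ?_, h2, h3⟩
      simp only [jogosB]
      rw [if_neg hj, h1]

-- ===== VERDICT (by name: the statement is the Claim_ definition above) =====
theorem esta_satisfeita_spec : Claim_equal_esta_satisfeita := by
  intro a _ hpre
  obtain ⟨hne, hwf⟩ := hpre
  unfold Spec_esta_satisfeita esta_satisfeita esta_satisfeita_alt
  simp only []
  have hnodup : (PySem.Dict.ofList a).keys.Nodup := PySem.Dict.nodup_keys_ofList a
  cases hlast : PySem.List.pyGet? (PySem.Dict.keys (PySem.Dict.ofList a)) (-1) with
  | none => rfl
  | some rodadaKey =>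
    have hlast' : (PySem.Dict.keys (PySem.Dict.ofList a)).getLast? = some rodadaKey := by
      rw [← PySem.List.pyGet?_neg_one]; exact hlast
    dsimp only
    obtain ⟨ts, ps, h1, h2, h3⟩ := loop_eq (PySem.Dict.ofList a)
      (PySem.Str.slice rodadaKey (some 0) (some 2)) (PySem.Dict.keys (PySem.Dict.ofList a)) []
      (fun j hj =>
        (not_iff_not.mpr (PySem.Dict.get?_eq_none_iff_not_mem_keys (PySem.Dict.ofList a) j)).mpr
          (by simpa using hj))
      (fun j hj hin l hg => by
        have hitem : (j, some l) ∈ (PySem.Dict.ofList a).items :=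
          (PySem.Dict.get?_eq_some_iff_mem_items (PySem.Dict.ofList a) j (some l) hnodup).mp hg
        have := hwf (j, some l) hitem (by simpa [hlast'] using hin)
        simpa using this)
    rw [h3, scanP_eq]
    simp [h1, h2]
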